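-- pv_equiv track=rewrite | github.com/matheusbernat/GitRep | Tentor/tenta2015_1.py | locations_facit
-- ===== SOURCE A (Python) =====
-- def locations_facit(g, start, steps):
--     if start not in g:
--         return []
--     elif steps <= 0:
--         return [start]
--     else:
--         res = []
--         for d in g[start]:
--             new = locations(g, d, steps-1)
--             for e in new:
--                 if e not in res:
--                     res.append(e)
--         return res
--
-- def locations(graph, start, steps):
--     """ Returns a list of nodes that can be reached leading out from our given """
--     if start not in graph:
--         return []
--     elif steps <= 0:
--         return [start]
--     else:
--         res = []
--         for kids in graph[start]:
--             new = locations(graph, kids, steps-1)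
--             for a in new:
--                 if a not in res:
--                     res.append(a)
--         return res
-- ===== SOURCE B (Python) =====
-- def locations_facit(g, start, steps):
--     # Same result as A, but computed with a memo dict keyed by (node, level):
--     # each (node, level) pair is expanded at most once.
--     memo = {}
--
--     def go(node, s):
--         if node not in g:
--             return []
--         if s <= 0:
--             return [node]
--         key = (node, s)
--         if key in memo:
--             return memo[key]
--         res = []
--         for d in g[node]:
--             for e in go(d, s - 1):
--                 if e not in res:
--                     res.append(e)
--         memo[key] = res
--         return res
--
--     return go(start, steps)
-- ===== Notes on version B (the rewrite author's own statement) =====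
-- stated objective: alternative
-- what changed: A re-expands a node afresh for every path reaching it; B threads a memo dict keyed by (node, level) through the recursion so each (node, level) pair is expanded at most once.
-- outside the precondition, e.g. on locations_facit({'a': ['a']}, 'a', 950): A returns ['a'], B returns ['a']
import Mathlib
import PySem

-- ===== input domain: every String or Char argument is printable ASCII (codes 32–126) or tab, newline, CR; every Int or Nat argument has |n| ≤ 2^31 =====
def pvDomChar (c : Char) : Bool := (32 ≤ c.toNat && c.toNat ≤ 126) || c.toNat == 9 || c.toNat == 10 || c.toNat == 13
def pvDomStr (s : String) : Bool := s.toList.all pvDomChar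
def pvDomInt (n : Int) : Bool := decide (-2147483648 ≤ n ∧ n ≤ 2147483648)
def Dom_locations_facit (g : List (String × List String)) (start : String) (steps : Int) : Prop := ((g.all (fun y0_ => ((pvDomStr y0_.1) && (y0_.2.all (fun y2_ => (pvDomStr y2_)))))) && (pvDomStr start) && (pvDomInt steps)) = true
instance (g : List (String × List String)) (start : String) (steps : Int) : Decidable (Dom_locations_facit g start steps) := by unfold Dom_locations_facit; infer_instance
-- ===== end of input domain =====

-- B threads a memo dict keyed by (node, level) through the recursion instead of A's plain double recursion; same return value.

-- the inner Python loop both versions share: 'for e in new: if e not in res: res.append(e)'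
def pvMerge (res new : List String) : List String :=
  new.foldl (fun r e => if e ∈ r then r else r ++ [e]) res

-- ===== PORT A =====
mutual
-- port of the helper 'locations' (its body is textually the same as 'locations_facit')
def locationsA (g : List (String × List String)) (start : String) (steps : Int) : List String :=
  match (PySem.Dict.mk g).get? start with
  | none => []                                -- 'if start not in graph: return []'
  | some nbrs =>
    if _h : steps ≤ 0 then [start]
    else locationsA_loop g nbrs (steps - 1) []
termination_by (steps.toNat, 0, 0)
decreasing_by exact Prod.Lex.left _ _ (by omega)

-- 'for kids in graph[start]: new = locations(graph, kids, steps-1); <merge new into res>'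
def locationsA_loop (g : List (String × List String)) (ds : List String) (steps : Int) (res : List String) : List String :=
  match ds with
  | [] => res
  | d :: rest => locationsA_loop g rest steps (pvMerge res (locationsA g d steps))
termination_by (steps.toNat, 1, ds.length)
decreasing_by
  · exact Prod.Lex.right _ (Prod.Lex.left _ _ (by omega))
  · exact Prod.Lex.right _ (Prod.Lex.right _ (by simp only [List.length_cons]; omega))
end

def locations_facit (g : List (String × List String)) (start : String) (steps : Int) : List String :=
  match (PySem.Dict.mk g).get? start with
  | none => []
  | some nbrs =>
    if _h : steps ≤ 0 then [start]
    else locationsA_loop g nbrs (steps - 1) []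

-- ===== PORT B =====
mutual
-- inner 'go(node, s)' of Source B, with the memo dict threaded through explicitly
def goB (g : List (String × List String)) (node : String) (s : Int)
    (memo : PySem.Dict (String × Int) (List String)) :
    List String × PySem.Dict (String × Int) (List String) :=
  match (PySem.Dict.mk g).get? node with
  | none => ([], memo)
  | some nbrs =>
    if _h : s ≤ 0 then ([node], memo)
    else
      match memo.get? (node, s) with
      | some v => (v, memo)
      | none =>
        let p := goList g nbrs (s - 1) memo []
        (p.1, p.2.insert (node, s) p.1)
termination_by (s.toNat, 0, 0)
decreasing_by exact Prod.Lex.left _ _ (by omega)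

-- 'for d in g[node]: <merge go(d, s-1) into res>'
def goList (g : List (String × List String)) (ds : List String) (s : Int)
    (memo : PySem.Dict (String × Int) (List String)) (res : List String) :
    List String × PySem.Dict (String × Int) (List String) :=
  match ds with
  | [] => (res, memo)
  | d :: rest =>
    let q := goB g d s memo
    goList g rest s q.2 (pvMerge res q.1)
termination_by (s.toNat, 1, ds.length)
decreasing_by
  · exact Prod.Lex.right _ (Prod.Lex.left _ _ (by omega))
  · exact Prod.Lex.right _ (Prod.Lex.right _ (by simp only [List.length_cons]; omega))
end

def locations_facit_alt (g : List (String × List String)) (start : String) (steps : Int) : List String :=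
  (goB g start steps PySem.Dict.empty).1

-- ===== PRECONDITION & SPEC =====
-- Pre_ helpers: edge-reachability in the INPUT graph — a shape property of the input
-- (which nodes start can reach, and whether any of them lies on a cycle).  This is ordinary
-- graph reachability over the adjacency lists, not the ports' step-counting recursion: the
-- ports recurse on 'steps'; pvReach iterates only over the finite node set of the graph.
-- total number of node occurrences in the graph (an upper bound on the closure's size)
def pvTot (g : List (String × List String)) : Nat :=
  g.length + (g.map (fun p => p.2.length)).sum + 1

-- set of nodes reachable from acc by following edges, computed by iterating fuel rounds
def pvReach (g : List (String × List String)) : Nat → List String → List String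
  | 0, acc => acc
  | fuel + 1, acc =>
      pvReach g fuel ((acc ++ acc.flatMap (fun v => (PySem.Dict.mk g).getD v [])).dedup)

-- does some node reachable from start lie on a cycle?
def pvCycleFrom (g : List (String × List String)) (start : String) : Bool :=
  (pvReach g (pvTot g) [start]).any
    (fun v => (pvReach g (pvTot g) (((PySem.Dict.mk g).getD v []).dedup)).contains v)

-- Pre_ excludes only the inputs where A's recursion depth, which is min(steps, longest walk
-- from start), can reach the vicinity of CPython's recursion limit and A raises RecursionError
-- (or its return-vs-raise boundary depends on the interpreter's configured limit): steps > 900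
-- together with a cycle reachable from start, or with more than 900 keys; B recurses to the
-- same depth and raises there too.
def Pre_locations_facit (g : List (String × List String)) (start : String) (steps : Int) : Prop :=
  steps ≤ 900 ∨ (g.length ≤ 900 ∧ pvCycleFrom g start = false)
instance (g : List (String × List String)) (start : String) (steps : Int) : Decidable (Pre_locations_facit g start steps) := by unfold Pre_locations_facit; infer_instance
def pvWitness_locations_facit : (List (String × List String)) × String × Int :=
  ([("a", ["b", "c"]), ("b", ["a"])], "a", 3)

def Spec_locations_facit (g : List (String × List String)) (start : String) (steps : Int) (out : List String) : Prop := out = locations_facit_alt g start steps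
instance (g : List (String × List String)) (start : String) (steps : Int) (out : List String) : Decidable (Spec_locations_facit g start steps out) := by unfold Spec_locations_facit; infer_instance

-- ===== CLAIM (what is proved, stated in full; the proofs are below) =====
def Claim_equal_locations_facit : Prop := ∀ (g : List (String × List String)) (start : String) (steps : Int), Dom_locations_facit g start steps → Pre_locations_facit g start steps → Spec_locations_facit g start steps (locations_facit g start steps)

-- ===== LEMMAS AND PROOFS =====

-- memo invariant: every stored value is A's helper value for its key
def MemoInv (g : List (String × List String)) (memo : PySem.Dict (String × Int) (List String)) : Prop :=
  ∀ (node : String) (s : Int) (v : List String), memo.get? (node, s) = some v → v = locationsA g node s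

theorem locationsA_pos (g : List (String × List String)) (node : String) (s : Int)
    (nbrs : List String) (hg : (PySem.Dict.mk g).get? node = some nbrs) (hle : ¬ s ≤ 0) :
    locationsA g node s = locationsA_loop g nbrs (s - 1) [] := by
  rw [locationsA, hg]
  simp [hle]

theorem goB_case (g : List (String × List String)) (s : Int)
    (hIH : ¬ s ≤ 0 → ∀ (ds res : List String) (memo : PySem.Dict (String × Int) (List String)), MemoInv g memo →
      (goList g ds (s - 1) memo res).1 = locationsA_loop g ds (s - 1) res ∧ MemoInv g (goList g ds (s - 1) memo res).2) :
    ∀ (node : String) (memo : PySem.Dict (String × Int) (List String)), MemoInv g memo →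
      (goB g node s memo).1 = locationsA g node s ∧ MemoInv g (goB g node s memo).2 := by
  intro node memo hInv
  rw [goB, locationsA]
  cases hg : (PySem.Dict.mk g).get? node with
  | none => exact ⟨rfl, hInv⟩
  | some nbrs =>
    by_cases hle : s ≤ 0
    · simp only [dif_pos hle]
      exact ⟨trivial, hInv⟩
    · simp only [dif_neg hle]
      cases hm : memo.get? (node, s) with
      | some v =>
        refine ⟨?_, hInv⟩
        have hv := hInv node s v hm
        rw [locationsA_pos g node s nbrs hg hle] at hv
        exact hv
      | none =>
        obtain ⟨h1, h2⟩ := hIH hle nbrs [] memo hInv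
        refine ⟨h1, ?_⟩
        intro node' s' v hv
        rw [PySem.Dict.get?_insert] at hv
        split at hv
        · rename_i heq
          have hn : node' = node := congrArg Prod.fst heq
          have hs : s' = s := congrArg Prod.snd heq
          subst hn; subst hs
          cases hv
          rw [h1, locationsA_pos g node' s' nbrs hg hle]
        · exact h2 node' s' v hv

theorem goList_of_goB (g : List (String × List String)) (s : Int)
    (hB : ∀ (node : String) (memo : PySem.Dict (String × Int) (List String)), MemoInv g memo →
      (goB g node s memo).1 = locationsA g node s ∧ MemoInv g (goB g node s memo).2) :
    ∀ (ds res : List String) (memo : PySem.Dict (String × Int) (List String)), MemoInv g memo →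
      (goList g ds s memo res).1 = locationsA_loop g ds s res ∧ MemoInv g (goList g ds s memo res).2 := by
  intro ds
  induction ds with
  | nil => intro res memo hInv; rw [goList, locationsA_loop]; exact ⟨rfl, hInv⟩
  | cons d rest ih =>
    intro res memo hInv
    obtain ⟨hq1, hq2⟩ := hB d memo hInv
    simp only [goList, locationsA_loop]
    rw [hq1]
    exact ih (pvMerge res (locationsA g d s)) (goB g d s memo).2 hq2

theorem main_lemma (g : List (String × List String)) (n : Nat) :
    ∀ (s : Int), s.toNat ≤ n →
      (∀ (node : String) (memo : PySem.Dict (String × Int) (List String)), MemoInv g memo →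
        (goB g node s memo).1 = locationsA g node s ∧ MemoInv g (goB g node s memo).2) ∧
      (∀ (ds res : List String) (memo : PySem.Dict (String × Int) (List String)), MemoInv g memo →
        (goList g ds s memo res).1 = locationsA_loop g ds s res ∧ MemoInv g (goList g ds s memo res).2) := by
  induction n with
  | zero =>
    intro s hs
    have hB := goB_case g s (fun hle => absurd rfl (by omega : ¬ (0:Int) = 0))
    exact ⟨hB, goList_of_goB g s hB⟩
  | succ n ih =>
    intro s hs
    have hB := goB_case g s (fun hle => (ih (s - 1) (by omega)).2)
    exact ⟨hB, goList_of_goB g s hB⟩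

theorem facit_eq_locationsA (g : List (String × List String)) (start : String) (steps : Int) :
    locations_facit g start steps = locationsA g start steps := by
  rw [locations_facit, locationsA]

theorem MemoInv_empty (g : List (String × List String)) : MemoInv g PySem.Dict.empty := by
  intro node s v hv
  simp [PySem.Dict.get?_empty] at hv

-- ===== VERDICT (by name: the statement is the Claim_ definition above) =====
theorem locations_facit_spec : Claim_equal_locations_facit := by
  intro g start steps _ _
  show locations_facit g start steps = locations_facit_alt g start steps
  rw [facit_eq_locationsA, locations_facit_alt]
  exact ((main_lemma g steps.toNat steps le_rfl).1 start PySem.Dict.empty (MemoInv_empty g)).1.symm
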